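-- pv_equiv track=rewrite | github.com/ElizabetDA/RLWarehouseNavigation | PythonScripts/environment/carrier_robot_gym/field.py | has_wall_access
-- ===== SOURCE A (Python) =====
-- def has_wall_access(grid):
--     """Проверяет, что каждая 1 имеет соседа-0."""
--     rows = len(grid)
--     cols = len(grid[0]) if rows > 0 else 0
--     directions = [(-1, 0), (1, 0), (0, -1), (0, 1)]
--
--     for r in range(rows):
--         for c in range(cols):
--             if grid[r][c] == 1:
--                 accessible = False
--                 for dr, dc in directions:
--                     nr, nc = r + dr, c + dc
--                     if 0 <= nr < rows and 0 <= nc < cols and grid[nr][nc] == 0: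
--                         accessible = True
--                         break
--                 if not accessible:
--                     return False
--     return True
-- ===== SOURCE B (Python) =====
-- def has_wall_access(grid):
--     """Проверяет, что каждая 1 имеет соседа-0."""
--     rows = len(grid)
--     cols = len(grid[0]) if rows > 0 else 0
--
--     def nbrs(r, c):
--         return [p for p in ((r - 1, c), (r + 1, c), (r, c - 1), (r, c + 1))
--                 if 0 <= p[0] < rows and 0 <= p[1] < cols]
--
--     accessible = set(p
--                      for r in range(rows)
--                      for c in range(cols)
--                      if grid[r][c] == 0
--                      for p in nbrs(r, c))
--     ones = [(r, c)
--             for r in range(rows)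
--             for c in range(cols)
--             if grid[r][c] == 1]
--     return all(p in accessible for p in ones)
-- ===== Notes on version B (the rewrite author's own statement) =====
-- stated objective: alternative
-- what changed: Inverts the traversal: instead of scanning each 1-cell's four neighbors with an inner direction loop and early return, B marks in one comprehension pass every in-bounds neighbor of every 0-cell into a set and then checks that all collected 1-cells lie in that set.
-- outside the precondition, e.g. on has_wall_access([[1, 1], [1]]): A returns False, B raises IndexError
import Mathlib
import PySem

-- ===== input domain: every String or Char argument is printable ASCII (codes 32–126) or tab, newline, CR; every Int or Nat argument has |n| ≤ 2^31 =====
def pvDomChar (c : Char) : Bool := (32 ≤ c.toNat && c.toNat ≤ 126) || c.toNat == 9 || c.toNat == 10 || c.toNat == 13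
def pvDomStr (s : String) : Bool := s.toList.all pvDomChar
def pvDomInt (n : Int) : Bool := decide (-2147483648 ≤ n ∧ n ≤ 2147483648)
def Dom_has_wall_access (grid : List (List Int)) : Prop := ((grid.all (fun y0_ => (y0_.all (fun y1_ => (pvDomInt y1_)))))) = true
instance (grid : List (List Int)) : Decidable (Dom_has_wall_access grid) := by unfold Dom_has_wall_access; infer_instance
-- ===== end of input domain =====

-- B inverts A's traversal: A scans each 1-cell's four neighbors with an early return;
-- B marks every in-bounds neighbor of every 0-cell into a set and checks all 1-cells are marked.

-- ===== PORT A =====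
-- grid[r][c]; default only reachable outside Pre_ (Python raises IndexError there)
def pvCell (grid : List (List Int)) (r c : Int) : Int :=
  PySem.List.pyGetD (PySem.List.pyGetD grid r []) c 2

def has_wall_access (grid : List (List Int)) : Bool :=
  let rows : Int := grid.length
  let cols : Int := if rows > 0 then ((PySem.List.pyGetD grid 0 []).length : Int) else 0
  let directions : List (Int × Int) := [(-1, 0), (1, 0), (0, -1), (0, 1)]
  (PySem.List.pyRange 0 rows 1).all fun r =>
    (PySem.List.pyRange 0 cols 1).all fun c =>
      if pvCell grid r c == 1 then
        directions.any fun d =>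
          let nr := r + d.1
          let nc := c + d.2
          decide (0 ≤ nr) && decide (nr < rows) && decide (0 ≤ nc) && decide (nc < cols)
            && (pvCell grid nr nc == 0)
      else true

-- ===== PORT B =====
def pvNbrs (rows cols r c : Int) : List (Int × Int) :=
  ([(r - 1, c), (r + 1, c), (r, c - 1), (r, c + 1)] : List (Int × Int)).filter
    (fun p => decide (0 ≤ p.1) && decide (p.1 < rows) && decide (0 ≤ p.2) && decide (p.2 < cols))

def has_wall_access_alt (grid : List (List Int)) : Bool :=
  let rows : Int := grid.length
  let cols : Int := if rows > 0 then ((PySem.List.pyGetD grid 0 []).length : Int) else 0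
  let accessible : PySem.Set (Int × Int) := PySem.Set.ofList
    ((PySem.List.pyRange 0 rows 1).flatMap fun r =>
      (PySem.List.pyRange 0 cols 1).flatMap fun c =>
        if pvCell grid r c == 0 then pvNbrs rows cols r c else [])
  let ones : List (Int × Int) :=
    (PySem.List.pyRange 0 rows 1).flatMap fun r =>
      (PySem.List.pyRange 0 cols 1).flatMap fun c =>
        if pvCell grid r c == 1 then [(r, c)] else []
  ones.all fun p => PySem.Set.contains accessible p

-- ===== PRECONDITION & SPEC =====
-- Pre_ excludes ragged grids whose some row is shorter than row 0: there Python A may read a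
-- missing cell and raise IndexError (though on a few such grids A happens to return False early).
def Pre_has_wall_access (grid : List (List Int)) : Prop :=
  ∀ row ∈ grid, (grid.headD []).length ≤ row.length
instance (grid : List (List Int)) : Decidable (Pre_has_wall_access grid) := by
  unfold Pre_has_wall_access; infer_instance

def pvWitness_has_wall_access : List (List Int) := [[1, 0], [0, 1]]

def Spec_has_wall_access (grid : List (List Int)) (out : Bool) : Prop := out = has_wall_access_alt grid
instance (grid : List (List Int)) (out : Bool) : Decidable (Spec_has_wall_access grid out) := by unfold Spec_has_wall_access; infer_instance

-- ===== CLAIM (what is proved, stated in full; the proofs are below) =====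
def Claim_equal_has_wall_access : Prop := ∀ (grid : List (List Int)), Dom_has_wall_access grid → Pre_has_wall_access grid → Spec_has_wall_access grid (has_wall_access grid)

-- ===== LEMMAS AND PROOFS =====

lemma mem_nbrs_iff (rows cols r' c' r c : Int) :
    (r, c) ∈ pvNbrs rows cols r' c' ↔
      ((r = r' - 1 ∧ c = c') ∨ (r = r' + 1 ∧ c = c') ∨ (r = r' ∧ c = c' - 1) ∨ (r = r' ∧ c = c' + 1))
      ∧ (0 ≤ r ∧ r < rows ∧ 0 ≤ c ∧ c < cols) := by
  simp [pvNbrs, List.mem_filter, Prod.ext_iff]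
  tauto

lemma adj_iff (grid : List (List Int)) (rows cols r c : Int)
    (hr0 : 0 ≤ r) (hr1 : r < rows) (hc0 : 0 ≤ c) (hc1 : c < cols) :
    (([(-1, 0), (1, 0), (0, -1), (0, 1)] : List (Int × Int)).any fun d =>
        decide (0 ≤ r + d.1) && decide (r + d.1 < rows) && decide (0 ≤ c + d.2)
          && decide (c + d.2 < cols) && (pvCell grid (r + d.1) (c + d.2) == 0)) = true ↔
      ∃ a, (0 ≤ a ∧ a < rows) ∧ ∃ b, (0 ≤ b ∧ b < cols) ∧
        pvCell grid a b = 0 ∧ (r, c) ∈ pvNbrs rows cols a b := by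
  simp only [List.any_cons, List.any_nil, Bool.or_eq_true, Bool.and_eq_true,
    decide_eq_true_eq, beq_iff_eq, Bool.false_eq_true, or_false]
  constructor
  · rintro (⟨⟨⟨⟨h0,h1⟩,h2⟩,h3⟩,hz⟩|⟨⟨⟨⟨h0,h1⟩,h2⟩,h3⟩,hz⟩|⟨⟨⟨⟨h0,h1⟩,h2⟩,h3⟩,hz⟩|⟨⟨⟨⟨h0,h1⟩,h2⟩,h3⟩,hz⟩)
    · exact ⟨_, ⟨h0, h1⟩, _, ⟨h2, h3⟩, hz, by rw [mem_nbrs_iff]; exact ⟨by omega, hr0, hr1, hc0, hc1⟩⟩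
    · exact ⟨_, ⟨h0, h1⟩, _, ⟨h2, h3⟩, hz, by rw [mem_nbrs_iff]; exact ⟨by omega, hr0, hr1, hc0, hc1⟩⟩
    · exact ⟨_, ⟨h0, h1⟩, _, ⟨h2, h3⟩, hz, by rw [mem_nbrs_iff]; exact ⟨by omega, hr0, hr1, hc0, hc1⟩⟩
    · exact ⟨_, ⟨h0, h1⟩, _, ⟨h2, h3⟩, hz, by rw [mem_nbrs_iff]; exact ⟨by omega, hr0, hr1, hc0, hc1⟩⟩
  · rintro ⟨a, ha, b, hb, hz, hmem⟩
    rw [mem_nbrs_iff] at hmem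
    rcases hmem.1 with ⟨e1,e2⟩|⟨e1,e2⟩|⟨e1,e2⟩|⟨e1,e2⟩
    · refine Or.inr (Or.inl ⟨⟨⟨⟨by omega, by omega⟩, by omega⟩, by omega⟩, ?_⟩)
      convert hz using 2 <;> omega
    · refine Or.inl ⟨⟨⟨⟨by omega, by omega⟩, by omega⟩, by omega⟩, ?_⟩
      convert hz using 2 <;> omega
    · refine Or.inr (Or.inr (Or.inr ⟨⟨⟨⟨by omega, by omega⟩, by omega⟩, by omega⟩, ?_⟩))
      convert hz using 2 <;> omega
    · refine Or.inr (Or.inr (Or.inl ⟨⟨⟨⟨by omega, by omega⟩, by omega⟩, by omega⟩, ?_⟩))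
      convert hz using 2 <;> omega

theorem ports_agree (grid : List (List Int)) :
    has_wall_access grid = has_wall_access_alt grid := by
  rw [Bool.eq_iff_iff]
  unfold has_wall_access has_wall_access_alt
  simp only [List.all_eq_true, List.mem_flatMap,
    PySem.List.mem_pyRange_one, PySem.Set.contains, List.contains_iff_mem,
    PySem.Set.mem_ofList]
  constructor
  · rintro hA ⟨pr, pc⟩ ⟨r, hr, c, hc, hmem⟩
    by_cases h1 : pvCell grid r c = 1
    · rw [if_pos (by simpa using h1)] at hmem
      obtain ⟨er, ec⟩ : r = pr ∧ c = pc := by simpa [Prod.ext_iff, eq_comm] using hmem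
      subst er; subst ec
      have hAr := hA r hr c hc
      rw [if_pos (by simpa using h1)] at hAr
      rw [adj_iff grid _ _ r c hr.1 hr.2 hc.1 hc.2] at hAr
      obtain ⟨a, ha, b, hb, hz, hm⟩ := hAr
      exact ⟨a, ha, b, hb, by rw [if_pos (by simpa using hz)]; exact hm⟩
    · rw [if_neg (by simpa using h1)] at hmem
      simp at hmem
  · intro hB r hr c hc
    by_cases h1 : pvCell grid r c = 1
    · rw [if_pos (by simpa using h1)]
      rw [adj_iff grid _ _ r c hr.1 hr.2 hc.1 hc.2]
      obtain ⟨a, ha, b, hb, hm⟩ := hB (r, c) ⟨r, hr, c, hc, by simp [h1]⟩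
      by_cases hz : pvCell grid a b = 0
      · rw [if_pos (by simpa using hz)] at hm
        exact ⟨a, ha, b, hb, hz, hm⟩
      · simp [hz] at hm
    · rw [if_neg (by simpa using h1)]

-- ===== VERDICT (by name: the statement is the Claim_ definition above) =====
theorem has_wall_access_spec : Claim_equal_has_wall_access := by
  intro grid _ _
  exact ports_agree grid
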